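-- pv_equiv track=rewrite | github.com/ArduPilot/ardupilot | Tools/ardupilotwaf/ardupilotwaf.py | set_double_precision_flags
-- ===== SOURCE A (Python) =====
-- def set_double_precision_flags(flags):
--     # set up flags for double precision files:
--     # * remove all single precision constant flags
--     # * set define to allow double precision math in AP headers
--
--     flags = flags[:] # copy the list to avoid affecting other builds
--
--     # remove GCC and clang single precision constant flags
--     for opt in ('-fsingle-precision-constant', '-cl-single-precision-constant'):
--         while True: # might have multiple copies from different sources
--             try:
--                 flags.remove(opt)
--             except ValueError:
--                 break
--     flags.append("-DAP_MATH_ALLOW_DOUBLE_FUNCTIONS=1")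
--
--     return flags
-- ===== SOURCE B (Python) =====
-- def set_double_precision_flags(flags):
--     exclude = {'-fsingle-precision-constant', '-cl-single-precision-constant'}
--     result = [f for f in flags if f not in exclude]
--     result.append('-DAP_MATH_ALLOW_DOUBLE_FUNCTIONS=1')
--     return result
-- ===== Notes on version B (the rewrite author's own statement) =====
-- stated objective: simpler
-- what changed: Replaces the copy-then-repeated-remove loop (try/except around list.remove per flag) by a single linear filtering pass against a set of excluded flags, then appends the define.
import Mathlib
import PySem

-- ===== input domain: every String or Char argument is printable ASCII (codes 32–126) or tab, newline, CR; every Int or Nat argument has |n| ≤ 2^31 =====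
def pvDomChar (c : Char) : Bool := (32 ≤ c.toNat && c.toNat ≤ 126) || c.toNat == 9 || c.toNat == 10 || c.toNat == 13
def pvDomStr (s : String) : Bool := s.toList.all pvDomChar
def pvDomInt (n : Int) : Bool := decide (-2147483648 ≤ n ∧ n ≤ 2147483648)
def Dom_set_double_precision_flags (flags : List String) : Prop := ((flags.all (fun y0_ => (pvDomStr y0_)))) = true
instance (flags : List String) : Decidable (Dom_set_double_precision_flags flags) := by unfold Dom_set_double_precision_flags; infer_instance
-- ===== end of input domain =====

-- B replaces A's copy-then-repeated-remove (while True: flags.remove(opt) under try/except)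
-- by one linear filtering pass against a set of excluded flags; objective: simpler.

-- ===== PORT A =====
-- termination helper for the 'while True' remove loop (a successful remove shortens the list)
lemma pvRemove?_some_lt {opt : String} {l l' : List String}
    (h : PySem.List.remove? l opt = some l') : l'.length < l.length := by
  have hm : opt ∈ l := by
    by_contra hn
    rw [(PySem.List.remove?_eq_none_iff _ _).mpr hn] at h
    cases h
  rw [PySem.List.remove?_eq_some_erase _ _ hm] at h
  cases h
  have h1 := List.length_erase_of_mem hm
  have h2 := List.length_pos_of_mem hm
  omega

-- the inner 'while True: try: flags.remove(opt) except ValueError: break' loop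
def pvRemoveAll (opt : String) (l : List String) : List String :=
  match h : PySem.List.remove? l opt with
  | none => l            -- ValueError: break
  | some l' => pvRemoveAll opt l'
termination_by l.length
decreasing_by exact pvRemove?_some_lt h

def set_double_precision_flags (flags : List String) : List String :=
  -- flags = flags[:] is a copy; value-identical here
  let flags := ["-fsingle-precision-constant", "-cl-single-precision-constant"].foldl
    (fun fs opt => pvRemoveAll opt fs) flags
  flags ++ ["-DAP_MATH_ALLOW_DOUBLE_FUNCTIONS=1"]

-- ===== PORT B =====
def set_double_precision_flags_alt (flags : List String) : List String :=
  let exclude : PySem.Set String :=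
    PySem.Set.ofList ["-fsingle-precision-constant", "-cl-single-precision-constant"]
  let result := flags.filter (fun f => !(PySem.Set.contains exclude f))
  result ++ ["-DAP_MATH_ALLOW_DOUBLE_FUNCTIONS=1"]

-- ===== PRECONDITION & SPEC =====
def Spec_set_double_precision_flags (flags : List String) (out : List String) : Prop := out = set_double_precision_flags_alt flags
instance (flags : List String) (out : List String) : Decidable (Spec_set_double_precision_flags flags out) := by unfold Spec_set_double_precision_flags; infer_instance

-- ===== CLAIM (what is proved, stated in full; the proofs are below) =====
def Claim_equal_set_double_precision_flags : Prop := ∀ (flags : List String), Dom_set_double_precision_flags flags → Spec_set_double_precision_flags flags (set_double_precision_flags flags)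

-- ===== LEMMAS AND PROOFS =====

lemma filter_erase_ne (a : String) (l : List String) :
    (l.erase a).filter (fun x => x ≠ a) = l.filter (fun x => x ≠ a) := by
  induction l with
  | nil => rfl
  | cons x xs ih =>
    by_cases hx : x = a
    · subst hx; simp [List.erase_cons_head]
    · rw [List.erase_cons_tail (by simpa using hx)]
      simp only [List.filter_cons]
      rw [ih]

lemma pvRemoveAll_eq_filter (opt : String) (l : List String) :
    pvRemoveAll opt l = l.filter (fun x => x ≠ opt) := by
  rw [pvRemoveAll]
  split
  · next h =>
    have hn : opt ∉ l := (PySem.List.remove?_eq_none_iff _ _).mp h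
    symm
    exact List.filter_eq_self.mpr (by intro x hx; simp; exact fun he => hn (he ▸ hx))
  · next l' h =>
    have hm : opt ∈ l := by
      by_contra hn
      rw [(PySem.List.remove?_eq_none_iff _ _).mpr hn] at h
      cases h
    have he : l' = l.erase opt := by
      have := PySem.List.remove?_eq_some_erase l opt hm
      rw [h] at this
      exact Option.some.inj this
    rw [he, pvRemoveAll_eq_filter opt (l.erase opt)]
    exact filter_erase_ne opt l
termination_by l.length
decreasing_by
  have h1 := List.length_erase_of_mem hm
  have h2 := List.length_pos_of_mem hm
  omega

-- ===== VERDICT (by name: the statement is the Claim_ definition above) =====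
theorem set_double_precision_flags_spec : Claim_equal_set_double_precision_flags := by
  intro flags _
  unfold Spec_set_double_precision_flags set_double_precision_flags set_double_precision_flags_alt
  simp only [List.foldl, pvRemoveAll_eq_filter, List.filter_filter]
  congr 1
  apply List.filter_congr
  intro x _
  simp [PySem.Set.mem_ofList]
  exact Bool.and_comm _ _
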